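-- pv_equiv track=rewrite | github.com/franzhentze92/GROW-Soil-and-Plant-Models | soil_analysis/helper.py | build_table_matrix
-- ===== SOURCE A (Python) =====
-- def build_table_matrix(rows):
--     """Convert row dictionary into a 2D matrix."""
--     if not rows:
--         return []
--
--     max_row = max(rows.keys())
--     max_col = max(max(row.keys(), default=0) for row in rows.values())
--
--     return [
--         [rows.get(r, {}).get(c, "") for c in range(1, max_col + 1)]
--         for r in range(1, max_row + 1)
--     ]
-- ===== SOURCE B (Python) =====
-- def build_table_matrix(rows):
--     """Convert row dictionary into a 2D matrix (scatter/fill over the sparse entries)."""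
--     if not rows:
--         return []
--
--     max_row = max(rows.keys())
--     max_col = max(max(row.keys(), default=0) for row in rows.values())
--
--     matrix = [[""] * max(max_col, 0) for _ in range(max(max_row, 0))]
--     for r, row in rows.items():
--         if 1 <= r <= max_row:
--             for c, v in row.items():
--                 if 1 <= c <= max_col:
--                     matrix[r - 1][c - 1] = v
--     return matrix
-- ===== Notes on version B (the rewrite author's own statement) =====
-- stated objective: alternative
-- what changed: A gathers: it does a dict lookup for every cell of the dense max_row x max_col grid; B preallocates the blank matrix and fills it with one scatter pass over the sparse entries only. Pre_ excludes only Lean-side association lists with a duplicated outer or inner key, which do not represent any Python dict (Python dict keys are unique), so no Python-representable input is excluded.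
import Mathlib
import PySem

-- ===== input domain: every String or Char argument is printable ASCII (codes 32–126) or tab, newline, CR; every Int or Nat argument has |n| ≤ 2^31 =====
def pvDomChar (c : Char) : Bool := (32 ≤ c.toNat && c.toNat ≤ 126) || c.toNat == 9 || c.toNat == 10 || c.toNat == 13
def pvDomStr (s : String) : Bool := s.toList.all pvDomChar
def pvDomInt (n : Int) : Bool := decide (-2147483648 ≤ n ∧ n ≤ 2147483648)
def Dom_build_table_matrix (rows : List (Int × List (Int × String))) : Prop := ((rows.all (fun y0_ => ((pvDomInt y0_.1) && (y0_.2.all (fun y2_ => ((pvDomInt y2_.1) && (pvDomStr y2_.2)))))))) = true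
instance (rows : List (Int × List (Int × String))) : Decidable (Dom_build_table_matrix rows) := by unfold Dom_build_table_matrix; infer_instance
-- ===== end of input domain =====

-- B replaces A's dense gather (a dict lookup for every cell of the max_row × max_col grid) by a
-- preallocated blank matrix filled by one scatter pass over the sparse entries (objective: alternative).

-- ===== PORT A =====
def build_table_matrix (rows : List (Int × List (Int × String))) : List (List String) :=
  if rows = [] then []
  else
    match PySem.List.max? (rows.map (·.1)) (fun x => x),
          PySem.List.max? (rows.map (fun p => (PySem.List.max? (p.2.map (·.1)) (fun x => x)).getD 0)) (fun x => x) with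
    | some max_row, some max_col =>
        (PySem.List.pyRange 1 (max_row + 1) 1).map (fun r =>
          (PySem.List.pyRange 1 (max_col + 1) 1).map (fun c =>
            (PySem.Dict.mk ((PySem.Dict.mk rows).getD r [])).getD c ""))
    | _, _ => []  -- unreachable: rows ≠ [] makes both maxima exist

-- ===== PORT B =====
def build_table_matrix_alt (rows : List (Int × List (Int × String))) : List (List String) :=
  if rows = [] then []
  else
    (PySem.List.max? (rows.map (·.1)) (fun x => x)).elim [] (fun max_row =>
      (PySem.List.max? (rows.map (fun p => (PySem.List.max? (p.2.map (·.1)) (fun x => x)).getD 0)) (fun x => x)).elim [] (fun max_col =>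
        let init := List.replicate (max max_row 0).toNat (List.replicate (max max_col 0).toNat "")
        rows.foldl (fun m p =>
          if 1 ≤ p.1 ∧ p.1 ≤ max_row then
            p.2.foldl (fun m2 q =>
              if 1 ≤ q.1 ∧ q.1 ≤ max_col then
                m2.modify (p.1 - 1).toNat (fun line => line.set (q.1 - 1).toNat q.2)
              else m2) m
          else m) init))  -- the 'elim []' arms are unreachable: rows ≠ [] makes both maxima exist

-- ===== PRECONDITION & SPEC =====
-- Pre_ excludes only association lists with a duplicated outer or inner key: those do not
-- represent any Python dict (Python dicts have unique keys), and on them first-match (A's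
-- dict lookup) versus last-write (B's scatter) order would be accidental.
def Pre_build_table_matrix (rows : List (Int × List (Int × String))) : Prop :=
  (rows.map (·.1)).Nodup ∧ ∀ p ∈ rows, (p.2.map (·.1)).Nodup
instance (rows : List (Int × List (Int × String))) : Decidable (Pre_build_table_matrix rows) := by unfold Pre_build_table_matrix; infer_instance
def pvWitness_build_table_matrix : (List (Int × List (Int × String))) := [(2, [(1, "a"), (3, "b")]), (1, [])]

def Spec_build_table_matrix (rows : List (Int × List (Int × String))) (out : List (List String)) : Prop := out = build_table_matrix_alt rows
instance (rows : List (Int × List (Int × String))) (out : List (List String)) : Decidable (Spec_build_table_matrix rows out) := by unfold Spec_build_table_matrix; infer_instance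

-- ===== CLAIM (what is proved, stated in full; the proofs are below) =====
def Claim_equal_build_table_matrix : Prop := ∀ (rows : List (Int × List (Int × String))), Dom_build_table_matrix rows → Pre_build_table_matrix rows → Spec_build_table_matrix rows (build_table_matrix rows)

-- ===== LEMMAS AND PROOFS =====

-- the effect of B's inner loop on one line, as a plain fold over the entries of one row
def lineUpd (mc : Int) (row : List (Int × String)) (line : List String) : List String :=
  row.foldl (fun l q => if 1 ≤ q.1 ∧ q.1 ≤ mc then l.set (q.1 - 1).toNat q.2 else l) line

theorem lineUpd_nil (mc : Int) (line : List String) : lineUpd mc [] line = line := rfl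

theorem lineUpd_cons (mc : Int) (q : Int × String) (row : List (Int × String)) (line : List String) :
    lineUpd mc (q :: row) line
      = lineUpd mc row (if 1 ≤ q.1 ∧ q.1 ≤ mc then line.set (q.1 - 1).toNat q.2 else line) := by
  by_cases h : 1 ≤ q.1 ∧ q.1 ≤ mc <;> simp [lineUpd, h]

theorem dict_get?_eq_find? {α : Type} (l : List (Int × α)) (k : Int) :
    (PySem.Dict.mk l).get? k = (l.find? (fun p => p.1 == k)).map (·.2) := by
  induction l with
  | nil => rfl
  | cons p t ih =>
      rw [show (p :: t) = ((p.1, p.2) :: t) from rfl, PySem.Dict.get?_mk_cons, List.find?_cons]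
      by_cases h : p.1 = k
      · simp [h]
      · have hb : (p.1 == k) = false := by simp [h]
        simp [hb, ih]

-- L1: B's inner loop only modifies row index idx, and there it applies lineUpd
theorem innerFold_getElem? (mc : Int) (idx : Nat) (row : List (Int × String))
    (m : List (List String)) (j : Nat) :
    (row.foldl (fun m2 q =>
        if 1 ≤ q.1 ∧ q.1 ≤ mc then
          m2.modify idx (fun line => line.set (q.1 - 1).toNat q.2)
        else m2) m)[j]?
      = if idx = j then (lineUpd mc row) <$> m[j]? else m[j]? := by
  induction row generalizing m with
  | nil =>
      simp only [List.foldl_nil]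
      split <;> cases m[j]? <;> rfl
  | cons q row ih =>
      rw [List.foldl_cons]
      by_cases hc : 1 ≤ q.1 ∧ q.1 ≤ mc
      · rw [if_pos hc, ih, List.getElem?_modify]
        by_cases hij : idx = j <;> cases m[j]? <;> simp [hij, lineUpd_cons, hc]
      · rw [if_neg hc, ih]
        by_cases hij : idx = j <;> cases m[j]? <;> simp [hij, lineUpd_cons, hc]

-- L3: pointwise value of lineUpd on a line of length mc.toNat, for a row with distinct keys
theorem lineUpd_getElem? (mc : Int) (row : List (Int × String)) (line : List String) (j : Nat)
    (hnd : (row.map (·.1)).Nodup) (hlen : line.length = mc.toNat) :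
    (lineUpd mc row line)[j]?
      = if (j : Int) + 1 ≤ mc then
          (match row.find? (fun q => q.1 == (j : Int) + 1) with
           | some q => some q.2
           | none => getElem? line j)
        else getElem? line j := by
  induction row generalizing line with
  | nil => simp [lineUpd_nil]
  | cons q row ih =>
      rw [List.map_cons, List.nodup_cons] at hnd
      obtain ⟨hq_notin, hnd'⟩ := hnd
      rw [lineUpd_cons, List.find?_cons]
      by_cases hq : q.1 = (j : Int) + 1
      · have hpred : (q.1 == (j : Int) + 1) = true := by simp [hq]
        rw [hpred]
        by_cases hm : (j : Int) + 1 ≤ mc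
        · have hc : 1 ≤ q.1 ∧ q.1 ≤ mc := by omega
          have hidx : (q.1 - 1).toNat = j := by omega
          rw [if_pos hc, hidx, ih _ hnd' (by simp [hlen])]
          have hfind : row.find? (fun p => p.1 == (j : Int) + 1) = none := by
            rw [List.find?_eq_none]
            intro x hx
            simp only [beq_iff_eq]
            intro hx1
            have hpx : q.1 = x.1 := by rw [hq, hx1]
            exact hq_notin (by rw [hpx]; exact List.mem_map_of_mem hx)
          rw [hfind, if_pos hm, if_pos hm]
          have hj : j < line.length := by omega
          simp [hj]
        · have hc : ¬ (1 ≤ q.1 ∧ q.1 ≤ mc) := by omega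
          rw [if_neg hc, ih _ hnd' hlen, if_neg hm, if_neg hm]
      · have hpred : (q.1 == (j : Int) + 1) = false := by simp [hq]
        rw [hpred]
        by_cases hc : 1 ≤ q.1 ∧ q.1 ≤ mc
        · have hidx : ¬ (q.1.toNat - 1 = j) := by omega
          rw [if_pos hc, ih _ hnd' (by simp [hlen])]
          simp [hidx]
        · rw [if_neg hc, ih _ hnd' hlen]

-- L2: pointwise value of B's scatter loop, for distinct outer keys
theorem scatter_getElem? (mr mc : Int) (rows : List (Int × List (Int × String)))
    (m : List (List String)) (i : Nat) (hnd : (rows.map (·.1)).Nodup) :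
    (rows.foldl (fun m p =>
        if 1 ≤ p.1 ∧ p.1 ≤ mr then
          p.2.foldl (fun m2 q =>
            if 1 ≤ q.1 ∧ q.1 ≤ mc then
              m2.modify (p.1 - 1).toNat (fun line => line.set (q.1 - 1).toNat q.2)
            else m2) m
        else m) m)[i]?
      = if (i : Int) + 1 ≤ mr then
          (match rows.find? (fun p => p.1 == (i : Int) + 1) with
           | some p => (lineUpd mc p.2) <$> m[i]?
           | none => m[i]?)
        else m[i]? := by
  induction rows generalizing m with
  | nil => simp
  | cons p rows ih =>
      rw [List.map_cons, List.nodup_cons] at hnd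
      obtain ⟨hp_notin, hnd'⟩ := hnd
      rw [List.foldl_cons, List.find?_cons]
      by_cases hp : p.1 = (i : Int) + 1
      · have hpred : (p.1 == (i : Int) + 1) = true := by simp [hp]
        rw [hpred]
        by_cases hm : (i : Int) + 1 ≤ mr
        · have hc : 1 ≤ p.1 ∧ p.1 ≤ mr := by omega
          have hidx : (p.1 - 1).toNat = i := by omega
          rw [if_pos hc, ih _ hnd']
          have hfind : rows.find? (fun r => r.1 == (i : Int) + 1) = none := by
            rw [List.find?_eq_none]
            intro x hx
            simp only [beq_iff_eq]
            intro hx1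
            have hpx : p.1 = x.1 := by rw [hp, hx1]
            exact hp_notin (by rw [hpx]; exact List.mem_map_of_mem hx)
          rw [hfind, if_pos hm, if_pos hm, innerFold_getElem?, hidx, if_pos rfl]
        · have hc : ¬ (1 ≤ p.1 ∧ p.1 ≤ mr) := by omega
          rw [if_neg hc, ih _ hnd', if_neg hm, if_neg hm]
      · have hpred : (p.1 == (i : Int) + 1) = false := by simp [hp]
        rw [hpred]
        by_cases hc : 1 ≤ p.1 ∧ p.1 ≤ mr
        · have hidx : (p.1 - 1).toNat ≠ i := by omega
          rw [if_pos hc, ih _ hnd', innerFold_getElem?, if_neg hidx]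
        · rw [if_neg hc, ih _ hnd']

theorem toNat_max_zero (m : Int) : (max m 0).toNat = m.toNat := by
  rcases le_total m 0 with h | h
  · rw [max_eq_right h]; omega
  · rw [max_eq_left h]

-- one output row in the found case: A's per-row gather equals lineUpd on a blank line
theorem inner_row_eq (mc : Int) (row : List (Int × String)) (hnd : (row.map (·.1)).Nodup) :
    (PySem.List.pyRange 1 (mc + 1) 1).map (fun c => (PySem.Dict.mk row).getD c "")
      = lineUpd mc row (List.replicate (max mc 0).toNat "") := by
  apply List.ext_getElem?
  intro j
  rw [List.getElem?_map, PySem.List.getElem?_pyRange_one,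
      lineUpd_getElem? mc row _ j hnd (by simp [toNat_max_zero])]
  by_cases hj : (j : Int) + 1 ≤ mc
  · have hj' : j < (mc + 1 - 1).toNat := by omega
    have hj2 : j < (max mc 0).toNat := by omega
    rw [if_pos hj', if_pos hj]
    simp only [Option.map_some]
    have hkey : (1 : Int) + (j : Int) = (j : Int) + 1 := by ring
    rw [hkey]
    cases hf : row.find? (fun q => q.1 == (j : Int) + 1) with
    | some q =>
        rw [PySem.Dict.getD_eq_get?_getD, dict_get?_eq_find?, hf]
        rfl
    | none =>
        rw [PySem.Dict.getD_eq_get?_getD, dict_get?_eq_find?, hf, List.getElem?_replicate,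
            if_pos hj2]
        rfl
  · have h1 : ¬ j < (mc + 1 - 1).toNat := by omega
    have h2 : ¬ j < (max mc 0).toNat := by omega
    rw [if_neg h1, if_neg hj, List.getElem?_replicate, if_neg h2]
    rfl

-- main equality of the two bodies in the non-degenerate branch
theorem gather_eq_scatter (mr mc : Int) (rows : List (Int × List (Int × String)))
    (hnd : (rows.map (·.1)).Nodup) (hnd2 : ∀ p ∈ rows, (p.2.map (·.1)).Nodup) :
    (PySem.List.pyRange 1 (mr + 1) 1).map (fun r =>
        (PySem.List.pyRange 1 (mc + 1) 1).map (fun c =>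
          (PySem.Dict.mk ((PySem.Dict.mk rows).getD r [])).getD c ""))
      = rows.foldl (fun m p =>
          if 1 ≤ p.1 ∧ p.1 ≤ mr then
            p.2.foldl (fun m2 q =>
              if 1 ≤ q.1 ∧ q.1 ≤ mc then
                m2.modify (p.1 - 1).toNat (fun line => line.set (q.1 - 1).toNat q.2)
              else m2) m
          else m) (List.replicate (max mr 0).toNat (List.replicate (max mc 0).toNat "")) := by
  apply List.ext_getElem?
  intro i
  rw [scatter_getElem? mr mc rows _ i hnd, List.getElem?_map, PySem.List.getElem?_pyRange_one]
  by_cases hm : (i : Int) + 1 ≤ mr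
  · have hi : i < (mr + 1 - 1).toNat := by omega
    have hi2 : i < (max mr 0).toNat := by omega
    rw [if_pos hi, if_pos hm]
    simp only [Option.map_some]
    have hkey : (1 : Int) + (i : Int) = (i : Int) + 1 := by ring
    rw [hkey]
    cases hf : rows.find? (fun p => p.1 == (i : Int) + 1) with
    | some p =>
        rw [List.getElem?_replicate, if_pos hi2]
        have hrow : (PySem.Dict.mk rows).getD ((i : Int) + 1) [] = p.2 := by
          rw [PySem.Dict.getD_eq_get?_getD, dict_get?_eq_find?, hf]; rfl
        rw [hrow, inner_row_eq mc p.2 (hnd2 p (List.mem_of_find?_eq_some hf))]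
        rfl
    | none =>
        rw [List.getElem?_replicate, if_pos hi2]
        have hrow : (PySem.Dict.mk rows).getD ((i : Int) + 1) [] = [] := by
          rw [PySem.Dict.getD_eq_get?_getD, dict_get?_eq_find?, hf]; rfl
        rw [hrow, inner_row_eq mc [] (by simp)]
        rfl
  · have h1 : ¬ i < (mr + 1 - 1).toNat := by omega
    have h2 : ¬ i < (max mr 0).toNat := by omega
    rw [if_neg h1, if_neg hm, List.getElem?_replicate, if_neg h2]
    rfl

-- ===== VERDICT (by name: the statement is the Claim_ definition above) =====
theorem build_table_matrix_spec : Claim_equal_build_table_matrix := by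
  intro rows _ hpre
  unfold Spec_build_table_matrix
  obtain ⟨hnd, hnd2⟩ := hpre
  by_cases h0 : rows = []
  · simp [build_table_matrix, build_table_matrix_alt, h0]
  · rw [build_table_matrix, build_table_matrix_alt, if_neg h0, if_neg h0]
    rcases h1 : PySem.List.max? (rows.map (·.1)) (fun x => x) with _ | mr <;>
      rcases h2 : PySem.List.max? (rows.map (fun p => (PySem.List.max? (p.2.map (·.1)) (fun x => x)).getD 0)) (fun x => x) with _ | mc <;>
      rw [h1, h2]
    all_goals try rfl
    exact gather_eq_scatter mr mc rows hnd hnd2
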